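-- pv_equiv track=rewrite | github.com/tiammomo/shuai-skills | skills/yuque-openapi/scripts/yuque_api_lib/toc_sync.py | build_unique_title_map
-- ===== SOURCE A (Python) =====
-- from typing import Any, Dict, List, Optional, Sequence, TypedDict, cast
--
-- def build_unique_title_map(records: Sequence[Dict[str, Any]]) -> Dict[str, Dict[str, Any]]:
--     unique: Dict[str, Dict[str, Any]] = {}
--     duplicate_titles: set[str] = set()
--     for record in records:
--         title = str(record.get("title") or "")
--         if not title:
--             continue
--         if title in unique:
--             duplicate_titles.add(title)
--             continue
--         unique[title] = record
--     for title in duplicate_titles: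
--         unique.pop(title, None)
--     return unique
-- ===== SOURCE B (Python) =====
-- from collections import Counter
--
--
-- def build_unique_title_map(records):
--     def title_of(record):
--         return str(record.get("title") or "")
--
--     counts = Counter(t for t in map(title_of, records) if t)
--     return {t: r for r in records if (t := title_of(r)) and counts[t] == 1}
-- ===== Notes on version B (the rewrite author's own statement) =====
-- stated objective: simpler
-- what changed: Replaces the maintain-unique-dict-plus-duplicate-set-then-pop scheme with a count-first-then-filter scheme: a Counter of non-empty titles, then one comprehension keeping records whose title occurs exactly once.
import Mathlib
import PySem

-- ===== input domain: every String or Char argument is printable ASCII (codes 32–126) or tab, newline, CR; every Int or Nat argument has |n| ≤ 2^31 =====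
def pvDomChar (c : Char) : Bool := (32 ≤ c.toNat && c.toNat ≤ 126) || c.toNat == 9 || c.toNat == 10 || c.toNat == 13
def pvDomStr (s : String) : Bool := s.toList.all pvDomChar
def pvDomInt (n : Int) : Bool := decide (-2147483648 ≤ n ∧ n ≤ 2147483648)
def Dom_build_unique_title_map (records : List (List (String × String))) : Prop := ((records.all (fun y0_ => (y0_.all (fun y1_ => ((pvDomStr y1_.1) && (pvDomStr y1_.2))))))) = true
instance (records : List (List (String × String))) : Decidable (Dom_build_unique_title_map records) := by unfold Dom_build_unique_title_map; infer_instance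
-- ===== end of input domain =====

-- B replaces A's unique-dict-plus-duplicate-set-then-pop scheme by a count-first-then-filter
-- scheme (a Counter of the non-empty titles, then one filtering pass); objective: simpler.

-- str(record.get("title") or "") — the value is a string here, so this is the lookup with default ""
def pvTitle (record : List (String × String)) : String :=
  PySem.Dict.getD (PySem.Dict.mk record) "title" ""

-- ===== PORT A =====
-- the body of A's first for-loop; the state is (unique, duplicate_titles)
def pvStepA (st : PySem.Dict String (List (String × String)) × PySem.Set String)
    (record : List (String × String)) :
    PySem.Dict String (List (String × String)) × PySem.Set String :=
  let title := pvTitle record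
  if title = "" then st
  else if st.1.contains title then (st.1, PySem.Set.add st.2 title)
  else (st.1.insert title record, st.2)

def build_unique_title_map (records : List (List (String × String))) :
    List (String × List (String × String)) :=
  let st := records.foldl pvStepA (PySem.Dict.empty, PySem.Set.empty)
  -- for title in duplicate_titles: unique.pop(title, None) — the result does not depend on the set's order
  (st.2.foldl (fun u t => u.erase t) st.1).items

-- ===== PORT B =====
def build_unique_title_map_alt (records : List (List (String × String))) :
    List (String × List (String × String)) :=
  let counts : PySem.Dict String Int :=
    PySem.Dict.counter ((records.map pvTitle).filter (fun t => t ≠ ""))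
  (records.foldl
    (fun (out : PySem.Dict String (List (String × String))) r =>
      if pvTitle r ≠ "" ∧ counts.getD (pvTitle r) 0 = 1 then out.insert (pvTitle r) r else out)
    PySem.Dict.empty).items

-- ===== PRECONDITION & SPEC =====
def Spec_build_unique_title_map (records : List (List (String × String))) (out : List (String × List (String × String))) : Prop := out = build_unique_title_map_alt records
instance (records : List (List (String × String))) (out : List (String × List (String × String))) : Decidable (Spec_build_unique_title_map records out) := by unfold Spec_build_unique_title_map; infer_instance

-- ===== CLAIM (what is proved, stated in full; the proofs are below) =====
def Claim_equal_build_unique_title_map : Prop := ∀ (records : List (List (String × String))), Dom_build_unique_title_map records → Spec_build_unique_title_map records (build_unique_title_map records)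

-- ===== LEMMAS AND PROOFS =====

def pvTitlesL (l : List (List (String × String))) : List String :=
  (l.map pvTitle).filter (fun t => t ≠ "")
def pvURef : List (List (String × String)) → PySem.Dict String (List (String × String)) →
    PySem.Dict String (List (String × String))
  | [], u => u
  | r :: l, u =>
    if pvTitle r = "" then pvURef l u
    else if u.contains (pvTitle r) then pvURef l u
    else pvURef l (u.insert (pvTitle r) r)
def pvSRef : List (List (String × String)) → PySem.Dict String (List (String × String)) →
    PySem.Set String → PySem.Set String
  | [], _, s => s
  | r :: l, u, s =>
    if pvTitle r = "" then pvSRef l u s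
    else if u.contains (pvTitle r) then pvSRef l u (PySem.Set.add s (pvTitle r))
    else pvSRef l (u.insert (pvTitle r) r) s

theorem pvFoldA_eq (l : List (List (String × String)))
    (u : PySem.Dict String (List (String × String))) (s : PySem.Set String) :
    l.foldl pvStepA (u, s) = (pvURef l u, pvSRef l u s) := by
  induction l generalizing u s with
  | nil => simp [pvURef, pvSRef]
  | cons r l ih =>
    simp only [List.foldl_cons, pvStepA, pvURef, pvSRef]
    split_ifs <;> simp [ih]

theorem pvEraseFold_items (ts : List String) (u : PySem.Dict String (List (String × String))) :
    (ts.foldl (fun u t => u.erase t) u).items = u.items.filter (fun p => decide (p.1 ∉ ts)) := by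
  induction ts generalizing u with
  | nil => simp
  | cons t ts ih =>
    rw [List.foldl_cons, ih]
    simp only [PySem.Dict.erase, List.filter_filter]
    apply List.filter_congr
    intro p _
    by_cases h1 : p.1 = t <;> by_cases h2 : p.1 ∈ ts <;> simp [h1, h2]

theorem pvTitlesL_cons (r : List (String × String)) (l : List (List (String × String))) :
    pvTitlesL (r :: l) = if pvTitle r = "" then pvTitlesL l else pvTitle r :: pvTitlesL l := by
  simp only [pvTitlesL, List.map_cons, List.filter_cons]
  by_cases h : pvTitle r = "" <;> simp [h]

theorem pvMemKeys_uRef (l : List (List (String × String)))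
    (u : PySem.Dict String (List (String × String))) (t : String) :
    t ∈ (pvURef l u).keys ↔ t ∈ u.keys ∨ t ∈ pvTitlesL l := by
  induction l generalizing u with
  | nil => simp [pvURef, pvTitlesL]
  | cons r l ih =>
    rw [pvTitlesL_cons]
    simp only [pvURef]
    split_ifs with h1 h2
    · simp [ih]
    · rw [ih]
      have hk : pvTitle r ∈ u.keys := (PySem.Dict.contains_iff_mem_keys u (pvTitle r)).mp h2
      constructor
      · rintro (h | h) <;> simp [h]
      · rintro (h | h)
        · exact Or.inl h
        · rcases List.mem_cons.mp h with rfl | h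
          · exact Or.inl hk
          · exact Or.inr h
    · rw [ih]
      simp only [PySem.Dict.mem_keys_insert, List.mem_cons]
      tauto

theorem pvMem_sRef (l : List (List (String × String)))
    (u : PySem.Dict String (List (String × String))) (s : PySem.Set String) (t : String) :
    t ∈ pvSRef l u s ↔ t ∈ s ∨ (t ∈ u.keys ∧ t ∈ pvTitlesL l) ∨ 2 ≤ (pvTitlesL l).count t := by
  induction l generalizing u s with
  | nil => simp [pvSRef, pvTitlesL]
  | cons r l ih =>
    rw [pvTitlesL_cons]
    simp only [pvSRef]
    split_ifs with h1 h2
    · simp [ih]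
    · rw [ih]
      have hk : pvTitle r ∈ u.keys := (PySem.Dict.contains_iff_mem_keys u (pvTitle r)).mp h2
      simp only [PySem.Set.mem_add, List.mem_cons]
      by_cases he : t = pvTitle r
      · subst he
        simp only [List.count_cons_self, hk, true_and, ← List.count_pos_iff]
        by_cases hs : pvTitle r ∈ s <;> simp [hs] <;> omega
      · have hc : List.count t (pvTitle r :: pvTitlesL l) = List.count t (pvTitlesL l) := by
          simp [List.count_cons, Ne.symm he]
        simp only [he, false_or, or_false, hc]
    · rw [ih]
      have hk : pvTitle r ∉ u.keys := fun hm => h2 ((PySem.Dict.contains_iff_mem_keys u (pvTitle r)).mpr hm)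
      by_cases he : t = pvTitle r
      · subst he
        have hin : pvTitle r ∈ (u.insert (pvTitle r) r).keys :=
          (PySem.Dict.contains_iff_mem_keys _ _).mp (PySem.Dict.contains_insert_self u (pvTitle r) r)
        have hcc : List.count (pvTitle r) (pvTitle r :: pvTitlesL l) = List.count (pvTitle r) (pvTitlesL l) + 1 :=
          List.count_cons_self
        constructor
        · rintro (h | ⟨-, h⟩ | h)
          · exact Or.inl h
          · exact Or.inr (Or.inr (by rw [hcc]; have := List.count_pos_iff.mpr h; omega))
          · exact Or.inr (Or.inr (by rw [hcc]; omega))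
        · rintro (h | ⟨hu, -⟩ | h)
          · exact Or.inl h
          · exact (hk hu).elim
          · rw [hcc] at h
            exact Or.inr (Or.inl ⟨hin, List.count_pos_iff.mp (by omega)⟩)
      · have hc : List.count t (pvTitle r :: pvTitlesL l) = List.count t (pvTitlesL l) := by
          simp [List.count_cons, Ne.symm he]
        simp only [PySem.Dict.mem_keys_insert, List.mem_cons, he, false_or, hc]

theorem pvCount_cons_le (t t0 : String) (L : List String) :
    List.count t L ≤ List.count t (t0 :: L) := by
  rw [List.count_cons]; omega

theorem pvURef_filter (l : List (List (String × String)))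
    (u : PySem.Dict String (List (String × String))) (c : String → Bool)
    (h1 : ∀ t, t ∈ u.keys → t ∈ pvTitlesL l → c t = false)
    (h2 : ∀ t, c t = true → (pvTitlesL l).count t ≤ 1) :
    ((pvURef l u).items).filter (fun p => c p.1)
      = u.items.filter (fun p => c p.1)
        ++ l.filterMap (fun r => if pvTitle r ≠ "" ∧ c (pvTitle r) = true then some (pvTitle r, r) else none) := by
  induction l generalizing u with
  | nil => simp [pvURef]
  | cons r l ih =>
    rw [pvTitlesL_cons] at h1 h2
    rw [List.filterMap_cons]
    by_cases ht : pvTitle r = ""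
    · rw [if_neg (by simp [ht])]
      rw [if_pos ht] at h1 h2
      simp only [pvURef, if_pos ht]
      exact ih u h1 h2
    · rw [if_neg ht] at h1 h2
      simp only [pvURef, if_neg ht]
      by_cases hcon : u.contains (pvTitle r) = true
      · rw [if_pos hcon]
        have hkm : pvTitle r ∈ u.keys := (PySem.Dict.contains_iff_mem_keys u (pvTitle r)).mp hcon
        have hcf : c (pvTitle r) = false := h1 _ hkm List.mem_cons_self
        rw [if_neg (by simp [hcf])]
        exact ih u (fun t htk htl => h1 t htk (List.mem_cons_of_mem _ htl))
          (fun t hct => le_trans (pvCount_cons_le t (pvTitle r) _) (h2 t hct))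
      · rw [if_neg hcon]
        have hcf : u.contains (pvTitle r) = false := by simpa using hcon
        have hc0 : ∀ t, c t = true → (pvTitlesL l).count t ≤ 1 :=
          fun t hct => le_trans (pvCount_cons_le t (pvTitle r) _) (h2 t hct)
        have h1' : ∀ t, t ∈ (u.insert (pvTitle r) r).keys → t ∈ pvTitlesL l → c t = false := by
          intro t htk htl
          rcases (PySem.Dict.mem_keys_insert u (pvTitle r) t r).mp htk with rfl | htk'
          · cases hcb : c (pvTitle r) with
            | false => rfl
            | true =>
              have h1c : List.count (pvTitle r) (pvTitle r :: pvTitlesL l) ≤ 1 := h2 _ hcb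
              rw [List.count_cons_self] at h1c
              have := List.count_pos_iff.mpr htl
              omega
          · exact h1 t htk' (List.mem_cons_of_mem _ htl)
        rw [ih (u.insert (pvTitle r) r) h1' hc0,
          PySem.Dict.items_insert_of_not_contains u r hcf]
        rw [List.filter_append]
        by_cases hcb : c (pvTitle r) = true
        · rw [if_pos ⟨ht, hcb⟩]
          simp [List.filter_cons, hcb, List.append_assoc]
        · rw [if_neg (by simp [hcb])]
          have hcb' : c (pvTitle r) = false := by simpa using hcb
          simp [List.filter_cons, hcb', List.append_assoc]

theorem pvMem_keyList (l : List (List (String × String))) (c : String → Bool) (t : String)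
    (h : t ∈ l.filterMap (fun r => if pvTitle r ≠ "" ∧ c (pvTitle r) = true then some (pvTitle r) else none)) :
    t ∈ pvTitlesL l := by
  induction l with
  | nil => simpa using h
  | cons r l ih =>
    rw [pvTitlesL_cons]
    rw [List.filterMap_cons] at h
    split_ifs with hcond
    · rw [if_neg (by simp [hcond])] at h
      exact ih h
    · split_ifs at h with hc2
      · rcases List.mem_cons.mp h with rfl | h'
        · exact List.mem_cons_self
        · exact List.mem_cons_of_mem _ (ih h')
      · exact List.mem_cons_of_mem _ (ih h)

theorem pvKeyList_nodup (l : List (List (String × String))) (c : String → Bool)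
    (h2 : ∀ t, c t = true → (pvTitlesL l).count t ≤ 1) :
    (l.filterMap (fun r => if pvTitle r ≠ "" ∧ c (pvTitle r) = true then some (pvTitle r) else none)).Nodup := by
  induction l with
  | nil => simp
  | cons r l ih =>
    rw [pvTitlesL_cons] at h2
    rw [List.filterMap_cons]
    have h2l : ∀ t, c t = true → (pvTitlesL l).count t ≤ 1 := by
      intro t hct
      have := h2 t hct
      split_ifs at this with ht
      · exact this
      · exact le_trans (pvCount_cons_le t (pvTitle r) _) this
    split_ifs with hcond
    · refine List.Nodup.cons ?_ (ih h2l)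
      intro hmem
      have htl : pvTitle r ∈ pvTitlesL l := pvMem_keyList l c _ hmem
      have h1c := h2 _ hcond.2
      rw [if_neg hcond.1, List.count_cons_self] at h1c
      have := List.count_pos_iff.mpr htl
      omega
    · exact ih h2l

theorem pvFoldB_items (l : List (List (String × String))) (c : String → Bool)
    (d : PySem.Dict String (List (String × String)))
    (hf : ∀ r ∈ l, (pvTitle r ≠ "" ∧ c (pvTitle r) = true) → d.contains (pvTitle r) = false)
    (hn : (l.filterMap (fun r => if pvTitle r ≠ "" ∧ c (pvTitle r) = true then some (pvTitle r) else none)).Nodup) :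
    (l.foldl
      (fun (out : PySem.Dict String (List (String × String))) r =>
        if pvTitle r ≠ "" ∧ c (pvTitle r) = true then out.insert (pvTitle r) r else out) d).items
      = d.items ++ l.filterMap (fun r => if pvTitle r ≠ "" ∧ c (pvTitle r) = true then some (pvTitle r, r) else none) := by
  induction l generalizing d with
  | nil => simp
  | cons r l ih =>
    rw [List.filterMap_cons]
    simp only [List.foldl_cons]
    rw [List.filterMap_cons] at hn
    by_cases hP : pvTitle r ≠ "" ∧ c (pvTitle r) = true
    · rw [if_pos hP] at hn ⊢
      rw [if_pos hP]
      have hcf : d.contains (pvTitle r) = false := hf r List.mem_cons_self hP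
      have hf' : ∀ r' ∈ l, (pvTitle r' ≠ "" ∧ c (pvTitle r') = true) →
          (d.insert (pvTitle r) r).contains (pvTitle r') = false := by
        intro r' hr' hP'
        have hne : pvTitle r' ≠ pvTitle r := by
          intro he
          have hmem : pvTitle r' ∈ l.filterMap
              (fun r => if pvTitle r ≠ "" ∧ c (pvTitle r) = true then some (pvTitle r) else none) :=
            List.mem_filterMap.mpr ⟨r', hr', by rw [if_pos hP']⟩
          rw [he] at hmem
          exact (List.nodup_cons.mp hn).1 hmem
        have hdf := hf r' (List.mem_cons_of_mem _ hr') hP'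
        rw [PySem.Dict.contains_insert]
        simp [hne, hdf]
      rw [ih (d.insert (pvTitle r) r) hf' (List.nodup_cons.mp hn).2,
        PySem.Dict.items_insert_of_not_contains d r hcf]
      simp [List.append_assoc]
    · rw [if_neg hP] at hn ⊢
      rw [if_neg hP]
      exact ih d (fun r' h' => hf r' (List.mem_cons_of_mem _ h')) hn

theorem pvMain (records : List (List (String × String))) :
    build_unique_title_map records = build_unique_title_map_alt records := by
  have h2c : ∀ t, (fun t => decide (List.count t (pvTitlesL records) = 1)) t = true →
      (pvTitlesL records).count t ≤ 1 := by
    intro t ht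
    simp only [decide_eq_true_iff] at ht
    omega
  have hB : build_unique_title_map_alt records
      = records.filterMap (fun r =>
          if pvTitle r ≠ "" ∧ (fun t => decide (List.count t (pvTitlesL records) = 1)) (pvTitle r) = true
          then some (pvTitle r, r) else none) := by
    have hiff : ∀ t : String,
        ((PySem.Dict.counter (pvTitlesL records)).getD t 0 = 1) ↔
          ((fun t => decide (List.count t (pvTitlesL records) = 1)) t = true) := by
      intro t
      rw [PySem.Dict.getD_counter]
      simp
    have hBfun : (fun (out : PySem.Dict String (List (String × String))) r =>
        if pvTitle r ≠ "" ∧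
            (PySem.Dict.counter (pvTitlesL records)).getD (pvTitle r) 0 = 1
        then out.insert (pvTitle r) r else out)
      = (fun (out : PySem.Dict String (List (String × String))) r =>
        if pvTitle r ≠ "" ∧ (fun t => decide (List.count t (pvTitlesL records) = 1)) (pvTitle r) = true
        then out.insert (pvTitle r) r else out) := by
      funext out r
      exact if_congr (and_congr_right fun _ => hiff _) rfl rfl
    show (records.foldl
        (fun (out : PySem.Dict String (List (String × String))) r =>
          if pvTitle r ≠ "" ∧
              (PySem.Dict.counter (pvTitlesL records)).getD (pvTitle r) 0 = 1
          then out.insert (pvTitle r) r else out) PySem.Dict.empty).items = _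
    rw [hBfun]
    exact (pvFoldB_items records (fun t => decide (List.count t (pvTitlesL records) = 1))
      PySem.Dict.empty (fun r _ _ => rfl) (pvKeyList_nodup records _ h2c)).trans rfl
  have hA : build_unique_title_map records
      = records.filterMap (fun r =>
          if pvTitle r ≠ "" ∧ (fun t => decide (List.count t (pvTitlesL records) = 1)) (pvTitle r) = true
          then some (pvTitle r, r) else none) := by
    show ((records.foldl pvStepA (PySem.Dict.empty, PySem.Set.empty)).2.foldl
        (fun u t => u.erase t)
        (records.foldl pvStepA (PySem.Dict.empty, PySem.Set.empty)).1).items = _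
    rw [pvFoldA_eq, pvEraseFold_items]
    show (pvURef records PySem.Dict.empty).items.filter
        (fun p => decide (p.1 ∉ pvSRef records PySem.Dict.empty PySem.Set.empty)) = _
    have hpred : ∀ p ∈ (pvURef records PySem.Dict.empty).items,
        decide (p.1 ∉ pvSRef records PySem.Dict.empty PySem.Set.empty)
          = (fun t => decide (List.count t (pvTitlesL records) = 1)) p.1 := by
      intro p hp
      have hpk := PySem.Dict.mem_keys_of_mem_items _ hp
      have htl : p.1 ∈ pvTitlesL records := by
        have := (pvMemKeys_uRef records PySem.Dict.empty p.1).mp hpk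
        simpa [PySem.Dict.keys_empty] using this
      have hcnt : 0 < List.count p.1 (pvTitlesL records) := List.count_pos_iff.mpr htl
      apply decide_eq_decide.mpr
      rw [pvMem_sRef]
      simp only [PySem.Dict.keys_empty, PySem.Set.empty, List.not_mem_nil, false_and, false_or]
      constructor
      · intro hno
        omega
      · intro h1'
        omega
    rw [List.filter_congr hpred]
    exact (pvURef_filter records PySem.Dict.empty
      (fun t => decide (List.count t (pvTitlesL records) = 1))
      (fun t htk _ => absurd htk (by simp [PySem.Dict.keys_empty])) h2c).trans rfl
  rw [hA, hB]

-- ===== VERDICT (by name: the statement is the Claim_ definition above) =====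
theorem build_unique_title_map_spec : Claim_equal_build_unique_title_map := by
  intro records _
  exact pvMain records
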